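-- pv_equiv track=rewrite | github.com/Life4gal/Tetris-AI | Src/AI.py | __get_number_of_holes
-- ===== SOURCE A (Python) =====
-- import typing
--
-- def __get_number_of_holes(board: typing.List[int], total_columns: int) -> int:
-- 	"""
-- 	:param board: The AI board
-- 	:param total_columns: Number of columns in the board
-- 	:return: The total number of holes
-- 	"""
-- 	holes = 0
-- 	row_holes = 0
-- 	previous_row = board[-1]
--
-- 	# traverse from top to bottom
-- 	for row in board[-2::-1]:
-- 		row_holes = ~row & (previous_row | row_holes)
--
-- 		for i in range(total_columns):
-- 			holes += (row_holes >> i) & 1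
--
-- 		previous_row = row
--
-- 	return holes
-- ===== SOURCE B (Python) =====
-- def __get_number_of_holes(board, total_columns):
-- 	"""
-- 	:param board: The AI board
-- 	:param total_columns: Number of columns in the board
-- 	:return: The total number of holes
-- 	"""
-- 	holes = 0
-- 	for c in range(total_columns):
-- 		seen = False
-- 		for row in reversed(board):
-- 			if (row >> c) & 1:
-- 				seen = True
-- 			elif seen:
-- 				holes += 1
-- 	return holes
-- ===== Notes on version B (the rewrite author's own statement) =====
-- stated objective: simpler
-- what changed: Replaces the row-major recurrence that accumulates a covered-holes bitmask (~row & (previous_row | row_holes)) and popcounts it per row with a plain column-major scan: for each column, walk the rows top to bottom keeping one boolean 'seen' flag and count empty cells below a seen filled cell.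
import Mathlib
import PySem

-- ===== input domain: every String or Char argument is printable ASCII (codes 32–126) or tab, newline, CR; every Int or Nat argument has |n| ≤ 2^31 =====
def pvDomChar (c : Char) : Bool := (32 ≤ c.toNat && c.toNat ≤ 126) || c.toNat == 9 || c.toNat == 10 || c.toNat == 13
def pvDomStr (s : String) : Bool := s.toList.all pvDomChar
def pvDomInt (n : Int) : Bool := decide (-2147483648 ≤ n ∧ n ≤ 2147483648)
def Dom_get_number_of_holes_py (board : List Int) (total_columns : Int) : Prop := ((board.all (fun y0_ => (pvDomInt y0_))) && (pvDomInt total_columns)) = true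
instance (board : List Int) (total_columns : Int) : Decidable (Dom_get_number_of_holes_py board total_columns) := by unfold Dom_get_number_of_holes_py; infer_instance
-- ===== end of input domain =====

-- B replaces A's row-major covered-holes bitmask recurrence with a plain per-column scan
-- keeping a boolean 'seen' flag (objective: simpler; same return value on every non-empty board).

-- ===== PORT A =====
-- 'board[-2::-1]' is board without its last element, reversed — ported as dropLast.reverse (exact
-- for every list); 'row_holes >> i' uses i.toNat, exact because every i of range(total_columns) is ≥ 0.
def get_number_of_holes_py (board : List Int) (total_columns : Int) : Int :=
  match PySem.List.pyGet? board (-1) with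
  | none => 0  -- board[-1] raises IndexError on an empty board: excluded by Pre_
  | some previous_row0 =>
    -- state = (holes, row_holes, previous_row)
    (board.dropLast.reverse.foldl
      (fun (st : Int × Int × Int) (row : Int) =>
        let row_holes := PySem.Int.band (Int.not row) (PySem.Int.bor st.2.2 st.2.1)
        let holes := (PySem.List.pyRange 0 total_columns 1).foldl
          (fun h i => h + PySem.Int.band (row_holes >>> (i.toNat : Int)) 1) st.1
        (holes, row_holes, row))
      (0, 0, previous_row0)).1

-- ===== PORT B =====
-- 'row >> c' uses c.toNat, exact because every c of range(total_columns) is ≥ 0.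
def get_number_of_holes_py_alt (board : List Int) (total_columns : Int) : Int :=
  (PySem.List.pyRange 0 total_columns 1).foldl
    (fun holes c =>
      -- state = (holes, seen)
      (board.reverse.foldl
        (fun (st : Int × Bool) (row : Int) =>
          if PySem.Int.band (row >>> (c.toNat : Int)) 1 ≠ 0 then (st.1, true)
          else if st.2 then (st.1 + 1, st.2) else st)
        (holes, false)).1)
    0

-- ===== PRECONDITION & SPEC =====
-- Pre_ excludes only the empty board, on which A raises IndexError at board[-1]
-- (B naturally returns 0 there: no rows, no holes).
def Pre_get_number_of_holes_py (board : List Int) (total_columns : Int) : Prop := board ≠ []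
instance (board : List Int) (total_columns : Int) : Decidable (Pre_get_number_of_holes_py board total_columns) := by unfold Pre_get_number_of_holes_py; infer_instance
def pvWitness_get_number_of_holes_py : List Int × Int := ([5, 2, 0], 3)

def Spec_get_number_of_holes_py (board : List Int) (total_columns : Int) (out : Int) : Prop := out = get_number_of_holes_py_alt board total_columns
instance (board : List Int) (total_columns : Int) (out : Int) : Decidable (Spec_get_number_of_holes_py board total_columns out) := by unfold Spec_get_number_of_holes_py; infer_instance

-- ===== CLAIM (what is proved, stated in full; the proofs are below) =====
def Claim_equal_get_number_of_holes_py : Prop := ∀ (board : List Int) (total_columns : Int), Dom_get_number_of_holes_py board total_columns → Pre_get_number_of_holes_py board total_columns → Spec_get_number_of_holes_py board total_columns (get_number_of_holes_py board total_columns)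

-- ===== LEMMAS AND PROOFS =====

-- Nat fact feeding the two's-complement bridges below.
theorem pvLandAddLdiff (m n : Nat) : (m &&& n) + m.ldiff n = m := by
  induction m using Nat.binaryRec generalizing n with
  | zero => simp [Nat.ldiff]
  | bit a m ih =>
    induction n using Nat.binaryRec with
    | zero => simp [Nat.ldiff]
    | bit b n _ =>
      rw [Nat.land_bit, Nat.ldiff_bit]
      have h := ih n
      cases a <;> cases b <;> simp only [Bool.and_false, Bool.and_true, Bool.not_true,
        Bool.not_false, Nat.bit, cond_true, cond_false] <;> omega

theorem pvBandEqLand (a b : Int) : PySem.Int.band a b = a.land b := by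
  cases a with
  | ofNat m => cases b with
    | ofNat n => simp [PySem.Int.band, Int.land]
    | negSucc n =>
      simp [PySem.Int.band, Int.land]
      have h := pvLandAddLdiff m n; omega
  | negSucc m => cases b with
    | ofNat n =>
      simp [PySem.Int.band, Int.land]
      have h := pvLandAddLdiff n m; omega
    | negSucc n =>
      simp [PySem.Int.band, Int.land]
      omega

theorem pvBorEqLor (a b : Int) : PySem.Int.bor a b = a.lor b := by
  cases a with
  | ofNat m => cases b with
    | ofNat n => simp [PySem.Int.bor, Int.lor]
    | negSucc n =>
      simp [PySem.Int.bor, Int.lor]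
      have h := pvLandAddLdiff n m; omega
  | negSucc m => cases b with
    | ofNat n =>
      simp [PySem.Int.bor, Int.lor]
      have h := pvLandAddLdiff m n; omega
    | negSucc n =>
      simp [PySem.Int.bor, Int.lor]
      omega

theorem pvNotEqLnot (a : Int) : Int.not a = a.lnot := by cases a <;> rfl

theorem pvTestBitShiftRight (x : Int) (i : Nat) : (x >>> i).testBit 0 = x.testBit i := by
  cases x with
  | ofNat m =>
    have h1 : (Int.ofNat m) >>> i = Int.ofNat (m >>> i) := rfl
    rw [h1]
    show (m >>> i).testBit 0 = m.testBit i
    rw [Nat.testBit_shiftRight, Nat.add_zero]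
  | negSucc m =>
    have h1 : (Int.negSucc m) >>> i = Int.negSucc (m >>> i) := rfl
    rw [h1]
    show (!(m >>> i).testBit 0) = !m.testBit i
    rw [Nat.testBit_shiftRight, Nat.add_zero]

theorem pvEmodTwoTestBit (x : Int) : x % 2 = if x.testBit 0 then 1 else 0 := by
  cases x with
  | ofNat m =>
    simp only [Int.testBit, Nat.testBit_zero, Int.ofNat_eq_natCast]
    by_cases hm : m % 2 = 1 <;> simp [hm] <;> omega
  | negSucc m =>
    simp only [Int.testBit, Nat.testBit_zero, Int.negSucc_eq]
    by_cases hm : m % 2 = 1 <;> simp [hm] <;> omega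

-- (x >> i) & 1, as both ports compute it, is the 0/1 value of bit i of x.
theorem pvBitVal (x : Int) (i : Nat) :
    PySem.Int.band (x >>> (i : Int)) 1 = if x.testBit i then 1 else 0 := by
  rw [Int.shiftRight_natCast_right, PySem.Int.band_one,
    PySem.Int.mod_eq_emod_of_pos (by omega), pvEmodTwoTestBit, pvTestBitShiftRight]

-- Bit i of A's updated row_holes mask.
theorem pvStepTestBit (row prev rh : Int) (i : Nat) :
    (PySem.Int.band (Int.not row) (PySem.Int.bor prev rh)).testBit i
      = (!row.testBit i && (prev.testBit i || rh.testBit i)) := by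
  rw [pvBandEqLand, pvBorEqLor, pvNotEqLnot, Int.testBit_land, Int.testBit_lor, Int.testBit_lnot]

-- Canonical count for one column: rows scanned top (head) to bottom with a 'seen' flag.
def pvColCount (i : Nat) : List Int → Bool → Int
  | [], _ => 0
  | r :: rs, seen =>
    (if seen && !r.testBit i then 1 else 0) + pvColCount i rs (seen || r.testBit i)

-- B's inner fold counts one column.
theorem pvBInner (c : Int) (rows : List Int) (h : Int) (seen : Bool) :
    (rows.foldl
      (fun (st : Int × Bool) (row : Int) =>
        if PySem.Int.band (row >>> (c.toNat : Int)) 1 ≠ 0 then (st.1, true)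
        else if st.2 then (st.1 + 1, st.2) else st)
      (h, seen)).1 = h + pvColCount c.toNat rows seen := by
  induction rows generalizing h seen with
  | nil => simp [pvColCount]
  | cons r rs ih =>
    rw [List.foldl_cons]
    have hstep : (if PySem.Int.band (r >>> (c.toNat : Int)) 1 ≠ 0 then (((h, seen) : Int × Bool).1, true)
          else if ((h, seen) : Int × Bool).2 then (((h, seen) : Int × Bool).1 + 1, ((h, seen) : Int × Bool).2)
          else ((h, seen) : Int × Bool))
        = ((h + (if seen && !r.testBit c.toNat then 1 else 0), seen || r.testBit c.toNat) : Int × Bool) := by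
      rw [pvBitVal]
      rcases hb : r.testBit c.toNat <;> rcases seen <;> simp
    rw [hstep, ih]
    simp only [pvColCount]
    ring

-- A's inner loop over range(total_columns) adds the popcount of the low bits of x.
theorem pvAInner (tc : Int) (x h : Int) :
    (PySem.List.pyRange 0 tc 1).foldl (fun h i => h + PySem.Int.band (x >>> (i.toNat : Int)) 1) h
      = h + ((List.range tc.toNat).map (fun k => if x.testBit k then (1 : Int) else 0)).sum := by
  rw [PySem.List.pyRange_one, List.foldl_map, PySem.List.foldl_add, sub_zero]
  congr 1
  apply congrArg List.sum
  apply List.map_congr_left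
  intro k _
  have h0 : ((0:Int) + (k:Int)).toNat = k := by simp
  rw [h0, pvBitVal]

-- A's outer fold equals the per-column canonical counts, column-summed.
theorem pvAOuter (tc : Int) (rows : List Int) :
    ∀ (holes rh prev : Int),
    (rows.foldl
      (fun (st : Int × Int × Int) (row : Int) =>
        let row_holes := PySem.Int.band (Int.not row) (PySem.Int.bor st.2.2 st.2.1)
        let holes := (PySem.List.pyRange 0 tc 1).foldl
          (fun h i => h + PySem.Int.band (row_holes >>> (i.toNat : Int)) 1) st.1
        (holes, row_holes, row))
      (holes, rh, prev)).1
      = holes + ((List.range tc.toNat).map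
          (fun k => pvColCount k rows (prev.testBit k || rh.testBit k))).sum := by
  induction rows with
  | nil => intro holes rh prev; simp [pvColCount]
  | cons row rs ih =>
    intro holes rh prev
    simp only [List.foldl_cons]
    rw [pvAInner, ih]
    rw [add_assoc]
    congr 1
    have : ∀ k : Nat,
        (if (PySem.Int.band (Int.not row) (PySem.Int.bor prev rh)).testBit k then (1:Int) else 0)
          + pvColCount k rs (row.testBit k
              || (PySem.Int.band (Int.not row) (PySem.Int.bor prev rh)).testBit k)
        = pvColCount k (row :: rs) (prev.testBit k || rh.testBit k) := by
      intro k
      simp only [pvColCount, pvStepTestBit]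
      rcases row.testBit k <;> rcases prev.testBit k <;> rcases rh.testBit k <;> simp
    calc ((List.range tc.toNat).map
            (fun k => if (PySem.Int.band (Int.not row) (PySem.Int.bor prev rh)).testBit k
                      then (1:Int) else 0)).sum
          + ((List.range tc.toNat).map
            (fun k => pvColCount k rs (row.testBit k
              || (PySem.Int.band (Int.not row) (PySem.Int.bor prev rh)).testBit k))).sum
        = ((List.range tc.toNat).map
            (fun k => (if (PySem.Int.band (Int.not row) (PySem.Int.bor prev rh)).testBit k
                      then (1:Int) else 0)
              + pvColCount k rs (row.testBit k
              || (PySem.Int.band (Int.not row) (PySem.Int.bor prev rh)).testBit k))).sum := by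
          rw [PySem.List.sum_map_add_int]
      _ = _ := by
          apply congrArg List.sum
          apply List.map_congr_left
          intro k _
          exact this k

-- B's whole program, as the same column-summed canonical count.
theorem pvBTotal (board : List Int) (tc : Int) :
    get_number_of_holes_py_alt board tc
      = ((List.range tc.toNat).map (fun k => pvColCount k board.reverse false)).sum := by
  unfold get_number_of_holes_py_alt
  have : ∀ (l : List Int) (h : Int),
      l.foldl (fun holes c =>
        (board.reverse.foldl
          (fun (st : Int × Bool) (row : Int) =>
            if PySem.Int.band (row >>> (c.toNat : Int)) 1 ≠ 0 then (st.1, true)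
            else if st.2 then (st.1 + 1, st.2) else st)
          (holes, false)).1) h
      = h + (l.map (fun c => pvColCount c.toNat board.reverse false)).sum := by
    intro l
    induction l with
    | nil => intro h; simp
    | cons c cs ih =>
      intro h
      simp only [List.foldl_cons]
      rw [ih, pvBInner]
      simp only [List.map_cons, List.sum_cons]
      ring
  rw [this, PySem.List.pyRange_one, List.map_map, sub_zero, zero_add]
  apply congrArg List.sum
  apply List.map_congr_left
  intro k _
  simp

-- ===== VERDICT (by name: the statement is the Claim_ definition above) =====
theorem get_number_of_holes_py_spec : Claim_equal_get_number_of_holes_py := by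
  intro board tc _ hpre
  unfold Spec_get_number_of_holes_py
  unfold Pre_get_number_of_holes_py at hpre
  rcases hrev : board.reverse with _ | ⟨p, rs⟩
  · exact absurd (by simpa using congrArg List.reverse hrev) hpre
  · have hlast : PySem.List.pyGet? board (-1) = some p := by
      rw [PySem.List.pyGet?_neg_one, List.getLast?_eq_head?_reverse, hrev]; rfl
    have hdrop : board.dropLast.reverse = rs := by
      rw [← List.tail_reverse, hrev]; rfl
    unfold get_number_of_holes_py
    rw [hlast]
    simp only [hdrop]
    rw [pvAOuter, pvBTotal, hrev]
    simp only [pvColCount, zero_add]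
    apply congrArg List.sum
    apply List.map_congr_left
    intro k _
    have h0 : (0:Int).testBit k = false := by simp [Int.testBit]
    simp [h0]
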